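-- pv_equiv track=rewrite | github.com/dhirensr/Ctci-problems-python | random_problems/fibeasy.py | helper
-- ===== SOURCE A (Python) =====
-- def helper(fib_seq):
--     temp=[]
--     if(len(fib_seq)==1):
--         return fib_seq[0]
--     else:
--         for i in range(1,len(fib_seq),2):
--             temp.append(fib_seq[i])
--         return helper(temp)
-- ===== SOURCE B (Python) =====
-- def helper(fib_seq):
--     # Closed form: repeatedly keeping the odd-indexed elements leaves the
--     # element at index 2**floor(log2(n)) - 1 of the original list.
--     n = len(fib_seq)
--     return fib_seq[(1 << (n.bit_length() - 1)) - 1]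
-- ===== Notes on version B (the rewrite author's own statement) =====
-- stated objective: faster
-- what changed: Replaces the recursive odd-index filtering passes with a closed-form index computation: the survivor is the element at index 2**floor(log2(n)) - 1, fetched in one step.
-- outside the precondition, e.g. on helper([]): A raises RecursionError, B raises ValueError
import Mathlib
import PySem

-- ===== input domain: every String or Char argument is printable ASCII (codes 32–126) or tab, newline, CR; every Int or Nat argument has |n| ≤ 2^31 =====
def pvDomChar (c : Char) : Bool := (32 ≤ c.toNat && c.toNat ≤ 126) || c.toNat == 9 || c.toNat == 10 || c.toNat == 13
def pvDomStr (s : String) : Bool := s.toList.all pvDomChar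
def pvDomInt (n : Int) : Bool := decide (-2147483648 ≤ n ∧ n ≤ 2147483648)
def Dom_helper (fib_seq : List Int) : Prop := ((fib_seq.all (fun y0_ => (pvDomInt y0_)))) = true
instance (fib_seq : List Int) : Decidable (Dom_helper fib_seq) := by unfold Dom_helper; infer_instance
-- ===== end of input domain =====

-- B replaces A's recursive odd-index filtering with a closed-form index lookup (asymptotically faster).

-- ===== PORT A =====
-- A: filter the odd-index elements into temp and recurse; the dite guard only
-- makes the recursion total (it holds whenever fib_seq ≠ [], the precondition).
def helper (fib_seq : List Int) : Int :=
  if fib_seq.length = 1 then (PySem.List.pyGet? fib_seq 0).getD 0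
  else
    let temp := (PySem.List.pyRange 1 fib_seq.length 2).foldl
      (fun acc i => acc ++ [(PySem.List.pyGet? fib_seq i).getD 0]) []
    if h : temp.length < fib_seq.length then helper temp else 0
termination_by fib_seq.length
decreasing_by exact h

-- ===== PORT B =====
-- Source B: fib_seq[(1 << (n.bit_length() - 1)) - 1].  n.bit_length() is ported as
-- n.log2 + 1, exact for n ≥ 1 (Pre_ guarantees fib_seq ≠ []); the index is then
-- always in range, so the .getD 0 default is never used under Pre_.
def helper_alt (fib_seq : List Int) : Int :=
  let n := fib_seq.length
  let idx : Nat := (1 <<< (n.log2 + 1 - 1)) - 1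
  (PySem.List.pyGet? fib_seq (idx : Int)).getD 0

-- ===== PRECONDITION & SPEC =====
-- A recurses forever (RecursionError) on the empty list; Pre_ excludes exactly that input.
def Pre_helper (fib_seq : List Int) : Prop := fib_seq ≠ []
instance (fib_seq : List Int) : Decidable (Pre_helper fib_seq) := by unfold Pre_helper; infer_instance
def pvWitness_helper : List Int := ([1, 1, 2, 3, 5])

def Spec_helper (fib_seq : List Int) (out : Int) : Prop := out = helper_alt fib_seq
instance (fib_seq : List Int) (out : Int) : Decidable (Spec_helper fib_seq out) := by unfold Spec_helper; infer_instance

-- ===== CLAIM (what is proved, stated in full; the proofs are below) =====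
def Claim_equal_helper : Prop := ∀ (fib_seq : List Int), Dom_helper fib_seq → Pre_helper fib_seq → Spec_helper fib_seq (helper fib_seq)

-- ===== LEMMAS AND PROOFS =====

-- range(1, n, 2) enumerates 1 + 2k for k < n/2
lemma pyRange_odd (n : Nat) :
    PySem.List.pyRange 1 (n : Int) 2 = (List.range (n / 2)).map (fun (k : Nat) => (1 : Int) + 2 * (k : Int)) := by
  rw [PySem.List.pyRange_of_pos 1 (n : Int) (by norm_num)]
  have hcount : (if (1 : Int) < (n : Int) then (((n : Int) - 1 + 2 - 1) / 2).toNat else 0) = n / 2 := by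
    split_ifs with h <;> omega
  rw [hcount]

-- the loop body builds exactly the odd-index elements of fib_seq
lemma temp_eq (l : List Int) :
    (PySem.List.pyRange 1 l.length 2).foldl
      (fun acc i => acc ++ [(PySem.List.pyGet? l i).getD 0]) []
    = (List.range (l.length / 2)).map (fun (k : Nat) => (PySem.List.pyGet? l ((1 : Int) + 2 * (k : Int))).getD 0) := by
  rw [pyRange_odd, PySem.List.foldl_append_singleton_eq_map, List.map_map]
  simp

lemma two_pow_log2_le (n : Nat) (h : n ≠ 0) : 2 ^ Nat.log2 n ≤ n := Nat.log2_self_le h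

-- closed form for A: the survivor is the element at index 2^⌊log2 n⌋ - 1
lemma helper_closed : ∀ (n : Nat) (l : List Int), l.length = n → l ≠ [] →
    helper l = (PySem.List.pyGet? l ((2 ^ Nat.log2 l.length - 1 : Nat) : Int)).getD 0 := by
  intro n
  induction n using Nat.strong_induction_on with
  | _ n IH =>
    intro l hlen hne
    rw [helper]
    by_cases h1 : l.length = 1
    · simp only [h1, if_pos]
      norm_num [h1, Nat.log2]
    · have hn2 : 2 ≤ n := by
        have : l.length ≠ 0 := by simpa using hne
        omega
      simp only [if_neg h1]
      rw [temp_eq l, hlen]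
      set f : Nat → Int := fun (k : Nat) => (PySem.List.pyGet? l ((1 : Int) + 2 * (k : Int))).getD 0 with hf
      have hlen2 : ((List.range (n / 2)).map f).length = n / 2 := by
        simp
      have hlt : n / 2 < n := by omega
      rw [dif_pos (by rw [hlen2]; omega)]
      have hne2 : (List.range (n / 2)).map f ≠ [] := by
        intro hcon
        have := congrArg List.length hcon
        simp at this
        omega
      rw [IH (n / 2) hlt _ (by rw [hlen2]) hne2]
      -- evaluate the index into temp
      set m : Nat := 2 ^ Nat.log2 (n / 2) - 1 with hm
      have hpow : 1 ≤ 2 ^ Nat.log2 (n / 2) := Nat.one_le_two_pow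
      have hmlt : m < n / 2 := by
        have := two_pow_log2_le (n / 2) (by omega)
        omega
      have hget : PySem.List.pyGet? ((List.range (n / 2)).map f) ((m : Nat) : Int)
          = some (f m) := by
        rw [PySem.List.pyGet?_natCast]
        rw [List.getElem?_map]
        rw [List.getElem?_range (by omega : m < n / 2)]
        rfl
      rw [hlen2, hget]
      simp only [Option.getD_some, hf]
      -- 1 + 2*m = 2^log2 n - 1
      have hlog : Nat.log2 n = Nat.log2 (n / 2) + 1 := by
        rw [Nat.log2_eq_log_two, Nat.log2_eq_log_two]
        have hd := Nat.log_div_base 2 n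
        have hp := Nat.log_pos (by norm_num : 1 < 2) hn2
        omega
      have hidx : ((1 : Int) + 2 * m) = ((2 ^ Nat.log2 n - 1 : Nat) : Int) := by
        rw [hlog, hm, pow_succ]
        omega
      rw [hidx]

-- helper_alt computes the same closed form
lemma helper_alt_eq (l : List Int) :
    helper_alt l = (PySem.List.pyGet? l ((2 ^ Nat.log2 l.length - 1 : Nat) : Int)).getD 0 := by
  simp [helper_alt, Nat.shiftLeft_eq]

-- ===== VERDICT (by name: the statement is the Claim_ definition above) =====
theorem helper_spec : Claim_equal_helper := by
  intro l _ hpre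
  unfold Spec_helper
  rw [helper_closed l.length l rfl hpre, helper_alt_eq]
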